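-- pv_equiv track=rewrite | github.com/IchBinJade/advent-of-code-python | 2024/day16.py | traverse_part_one
-- ===== SOURCE A (Python) =====
-- import heapq
--
-- def traverse_part_one(maze, start_pos):
--     cost = 0
--     start_row, start_col = start_pos
--     dr, dc = 0, 1 # As we start facing east
--     priority_q = [(cost, start_row, start_col, dr, dc)]
--     visited = {(start_row, start_col, dr, dc)}
--
--     while priority_q:
--         cost, curr_row, curr_col, dr, dc = heapq.heappop(priority_q)
--         visited.add((curr_row, curr_col, dr, dc))
--
--         if maze[curr_row][curr_col] == "E":
--             return cost
--
--         DIRECTIONS = [(cost + 1, curr_row + dr, curr_col + dc, dr, dc), (cost + 1000, curr_row, curr_col, dc, -dr), (cost + 1000, curr_row, curr_col, -dc, dr)]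
--         for new_cost, new_row, new_col, new_dr, new_dc in DIRECTIONS:
--             if maze[new_row][new_col] != "#" and (new_row, new_col, new_dr, new_dc) not in visited:
--                 heapq.heappush(priority_q, (new_cost, new_row, new_col, new_dr, new_dc))
-- ===== SOURCE B (Python) =====
-- def traverse_part_one(maze, start_pos):
--     start_row, start_col = start_pos
--     buckets = {0: [(start_row, start_col, 0, 1)]}
--     visited = {(start_row, start_col, 0, 1)}
--
--     while buckets:
--         cost = min(buckets)
--         for row, col, dr, dc in sorted(buckets.pop(cost)):
--             visited.add((row, col, dr, dc))
--             if maze[row][col] == "E":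
--                 return cost
--             for extra, nxt in ((1, (row + dr, col + dc, dr, dc)),
--                                (1000, (row, col, dc, -dr)),
--                                (1000, (row, col, -dc, dr))):
--                 if maze[nxt[0]][nxt[1]] != "#" and nxt not in visited:
--                     buckets.setdefault(cost + extra, []).append(nxt)
-- ===== Notes on version B (the rewrite author's own statement) =====
-- stated objective: alternative
-- what changed: B replaces A's single heap of (cost,row,col,dr,dc) 5-tuples by a bucket queue: a dict mapping each cost to the list of states discovered at that cost; the outer loop pops the minimum-cost bucket with min(buckets)+dict.pop and processes its states as one sorted layer, appending newly discovered states into the cost+1 / cost+1000 buckets, so there is no priority queue and no per-push ordering work.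
import Mathlib
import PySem

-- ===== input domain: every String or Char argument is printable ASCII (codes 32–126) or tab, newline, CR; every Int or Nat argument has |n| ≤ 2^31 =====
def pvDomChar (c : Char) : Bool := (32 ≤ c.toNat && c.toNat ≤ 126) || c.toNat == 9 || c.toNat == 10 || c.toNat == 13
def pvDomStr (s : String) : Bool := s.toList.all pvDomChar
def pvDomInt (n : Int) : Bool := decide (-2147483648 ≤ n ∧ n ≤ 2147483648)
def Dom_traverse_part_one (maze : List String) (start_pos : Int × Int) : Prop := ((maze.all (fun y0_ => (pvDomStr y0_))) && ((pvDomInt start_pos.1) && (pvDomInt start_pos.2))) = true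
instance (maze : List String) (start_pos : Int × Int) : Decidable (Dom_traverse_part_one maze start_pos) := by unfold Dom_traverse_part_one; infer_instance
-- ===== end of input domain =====

-- B replaces A's binary heap of (cost,state) 5-tuples by a bucket queue (dict cost -> list of states)
-- processed one sorted cost-layer at a time; same return value, no speed claim.

-- ===== PORT A =====
-- maze[r][c], both indexings with Python semantics (negative wraps; none = IndexError, excluded by Pre_;
-- the port treats that none as neither 'E' nor '#', which is only reachable outside Pre_)
def pvCell (maze : List String) (r c : Int) : Option Char :=
  match PySem.List.pyGet? maze r with
  | none => none
  | some row => PySem.Str.pyGet? row c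

-- Python's lexicographic tuple '<='/'<' on the 5-tuples (Lean's Prod order is pointwise, so explicit comparators)
def pvEntryLe (a b : Int × Int × Int × Int × Int) : Bool :=
  decide (a.1 < b.1 ∨ (a.1 = b.1 ∧ (a.2.1 < b.2.1 ∨ (a.2.1 = b.2.1 ∧
    (a.2.2.1 < b.2.2.1 ∨ (a.2.2.1 = b.2.2.1 ∧ (a.2.2.2.1 < b.2.2.2.1 ∨ (a.2.2.2.1 = b.2.2.2.1 ∧
      a.2.2.2.2 ≤ b.2.2.2.2))))))))

def pvEntryLt (a b : Int × Int × Int × Int × Int) : Bool :=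
  decide (a.1 < b.1 ∨ (a.1 = b.1 ∧ (a.2.1 < b.2.1 ∨ (a.2.1 = b.2.1 ∧
    (a.2.2.1 < b.2.2.1 ∨ (a.2.2.1 = b.2.2.1 ∧ (a.2.2.2.1 < b.2.2.2.1 ∨ (a.2.2.2.1 = b.2.2.2.1 ∧
      a.2.2.2.2 < b.2.2.2.2))))))))

-- A's push filter: target cell is not '#' and the state was not visited
def pvOpen (maze : List String) (visited : PySem.Set (Int × Int × Int × Int))
    (d : Int × Int × Int × Int × Int) : Bool :=
  decide (¬ pvCell maze d.2.1 d.2.2.1 = some '#') && !(PySem.Set.contains visited d.2)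

-- fuel for the while-loop (same formula and same one-unit-per-processed-state consumption in both ports)
def pvFuel (maze : List String) : Nat :=
  (4 * (maze.length + 1) * ((maze.map (fun s => s.toList.length)).sum + 2) + 16) ^ 2

-- heapq.heappush, ported as ordered insertion with the lex comparator
-- (exact for everything the heap is observed through: the popped minimum and the queue multiset)
def pvHeapPush (e : Int × Int × Int × Int × Int) :
    List (Int × Int × Int × Int × Int) → List (Int × Int × Int × Int × Int)
  | [] => [e]
  | x :: xs => if pvEntryLe e x then e :: x :: xs else x :: pvHeapPush e xs

def pvRunA (maze : List String) :
    Nat → List (Int × Int × Int × Int × Int) → PySem.Set (Int × Int × Int × Int) → Int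
  | 0, _, _ => 0                 -- fuel exhausted (not reached on Pre_ inputs)
  | _ + 1, [], _ => 0            -- queue empty: Python falls through returning None (excluded by Pre_)
  | fuel + 1, e :: rest, visited =>
    match e with
    | (cost, curr_row, curr_col, dr, dc) =>    -- heapq.heappop = head of the ordered queue
      let visited := PySem.Set.add visited (curr_row, curr_col, dr, dc)
      if pvCell maze curr_row curr_col = some 'E' then cost
      else
        pvRunA maze fuel
          ([(cost + 1, curr_row + dr, curr_col + dc, dr, dc),
            (cost + 1000, curr_row, curr_col, dc, -dr),
            (cost + 1000, curr_row, curr_col, -dc, dr)].foldl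
            (fun q d => if pvOpen maze visited d then pvHeapPush d q else q) rest)
          visited

def traverse_part_one (maze : List String) (start_pos : Int × Int) : Int :=
  match start_pos with
  | (start_row, start_col) =>
    pvRunA maze (pvFuel maze) [(0, start_row, start_col, 0, 1)]
      (PySem.Set.ofList [(start_row, start_col, 0, 1)])

-- ===== PORT B =====
-- Python's lexicographic order on the 4-tuple states, as a sort key into nested Prod.Lex
def pvKey4 (s : Int × Int × Int × Int) : Lex (Int × Lex (Int × Lex (Int × Int))) :=
  toLex (s.1, toLex (s.2.1, toLex (s.2.2.1, s.2.2.2)))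

-- buckets.setdefault(cost + extra, []).append(nxt)
def pvBucketAdd (b : PySem.Dict Int (List (Int × Int × Int × Int))) (k : Int)
    (s : Int × Int × Int × Int) : PySem.Dict Int (List (Int × Int × Int × Int)) :=
  b.insert k (b.getD k [] ++ [s])

-- one state of the current layer: visited.add, the E-test (none = return cost), then the three pushes
def pvStepB (maze : List String) (c : Int) (s : Int × Int × Int × Int)
    (b : PySem.Dict Int (List (Int × Int × Int × Int)))
    (visited : PySem.Set (Int × Int × Int × Int)) :
    Option (PySem.Dict Int (List (Int × Int × Int × Int)) × PySem.Set (Int × Int × Int × Int)) :=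
  let visited := PySem.Set.add visited s
  if pvCell maze s.1 s.2.1 = some 'E' then none
  else some
    ([((1 : Int), (s.1 + s.2.2.1, s.2.1 + s.2.2.2, s.2.2.1, s.2.2.2)),
      ((1000 : Int), (s.1, s.2.1, s.2.2.2, -s.2.2.1)),
      ((1000 : Int), (s.1, s.2.1, -s.2.2.2, s.2.2.1))].foldl
      (fun b d =>
        if (!(pvCell maze d.2.1 d.2.2.1 == some '#')) && !(PySem.Set.contains visited d.2)
        then pvBucketAdd b (c + d.1) d.2 else b) b, visited)

-- the while-loop over the bucket dict; the current sorted layer is walked state by state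
def pvGo (maze : List String) :
    Nat → List (Int × Int × Int × Int) → Int →
    PySem.Dict Int (List (Int × Int × Int × Int)) → PySem.Set (Int × Int × Int × Int) → Int
  | 0, _, _, _, _ => 0           -- fuel exhausted (not reached on Pre_ inputs)
  | fuel + 1, [], _, b, visited =>
    if b.items.isEmpty then 0    -- while buckets: exits; Python returns None (excluded by Pre_)
    else
      match PySem.List.min? b.keys (fun k => k) with   -- cost = min(buckets)
      | none => 0                -- unreachable: the dict is nonempty
      | some c =>
        match PySem.List.sorted (b.getD c []) pvKey4 with   -- sorted(buckets.pop(cost))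
        | [] => 0                -- unreachable: stored bucket lists are never empty
        | s :: rest =>
          match pvStepB maze c s (b.erase c) visited with
          | none => c
          | some (b', v') => pvGo maze fuel rest c b' v'
  | fuel + 1, s :: rest, c, b, visited =>
    match pvStepB maze c s b visited with
    | none => c
    | some (b', v') => pvGo maze fuel rest c b' v'

def traverse_part_one_alt (maze : List String) (start_pos : Int × Int) : Int :=
  match start_pos with
  | (start_row, start_col) =>
    pvGo maze (pvFuel maze) [] 0
      (PySem.Dict.ofList [((0 : Int), [(start_row, start_col, (0 : Int), (1 : Int))])])
      (PySem.Set.ofList [(start_row, start_col, 0, 1)])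

-- ===== PRECONDITION & SPEC =====
-- Pre_ = exactly the inputs on which the Python A returns an int.  A raises IndexError when it first pops a state whose
-- forward cell index is out of range (negative indices wrap), and falls through returning None (not an Int) when the
-- queue drains without popping an 'E'.  Pops happen in increasing (cost,row,col,ddr,ddc) tuple order, and all weights are
-- positive, so A returns an int exactly when some 'E' state is reachable and its key (shortest cost, then the state
-- tuple) precedes the key of every reachable crashing state.  Pre_ states that, via shortest distances of the state
-- graph (a plain label-correcting relaxation to a fixpoint — not A's queue/visited discipline).
def pvDistLoop (maze : List String) :
    Nat → List (Int × Int × Int × Int) → PySem.Dict (Int × Int × Int × Int) Int →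
    PySem.Dict (Int × Int × Int × Int) Int
  | 0, _, dist => dist
  | _ + 1, [], dist => dist
  | fuel + 1, s :: rest, dist =>
    let dcur := (dist.get? s).getD 0
    if pvCell maze s.1 s.2.1 = some 'E' then pvDistLoop maze fuel rest dist  -- 'E' states are absorbing (A returns there)
    else
      let acc := [((1 : Int), (s.1 + s.2.2.1, s.2.1 + s.2.2.2, s.2.2.1, s.2.2.2)),
                  ((1000 : Int), (s.1, s.2.1, s.2.2.2, -s.2.2.1)),
                  ((1000 : Int), (s.1, s.2.1, -s.2.2.2, s.2.2.1))].foldl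
        (fun (acc : List (Int × Int × Int × Int) × PySem.Dict (Int × Int × Int × Int) Int) m =>
          match pvCell maze m.2.1 m.2.2.1 with
          | none => acc
          | some ch =>
            if ch = '#' then acc
            else
              let nd := dcur + m.1
              match acc.2.get? m.2 with
              | some old => if nd < old then (m.2 :: acc.1, acc.2.insert m.2 nd) else acc
              | none => (m.2 :: acc.1, acc.2.insert m.2 nd)) (rest, dist)
      pvDistLoop maze fuel acc.1 acc.2

-- shortest distance (in A's weighted state graph) to every reachable state; ample fuel for the fixpoint
def pvDistMap (maze : List String) (sr sc : Int) : PySem.Dict (Int × Int × Int × Int) Int :=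
  pvDistLoop maze ((4 * (maze.length + 2) * ((maze.map (fun t => t.toList.length)).sum + 2) + 16) ^ 2)
    [(sr, sc, 0, 1)] (PySem.Dict.empty.insert (sr, sc, 0, 1) 0)

-- least (dist, row, col, ddr, ddc) key among the recorded states satisfying p (order-independent over the dict items)
def pvMinKappa (l : List ((Int × Int × Int × Int) × Int)) (p : (Int × Int × Int × Int) → Bool) :
    Option (Int × Int × Int × Int × Int) :=
  l.foldl (fun acc it =>
    if p it.1 then
      match acc with
      | none => some (it.2, it.1)
      | some b => if pvEntryLt (it.2, it.1) b then some (it.2, it.1) else some b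
    else acc) none

def pvPreB (maze : List String) (start_pos : Int × Int) : Bool :=
  !(pvCell maze start_pos.1 start_pos.2 == none) &&
  (let dist := pvDistMap maze start_pos.1 start_pos.2
   let bestE := pvMinKappa dist.items (fun s => pvCell maze s.1 s.2.1 == some 'E')
   let bestCrash := pvMinKappa dist.items (fun s =>
     !(pvCell maze s.1 s.2.1 == some 'E') && (pvCell maze (s.1 + s.2.2.1) (s.2.1 + s.2.2.2) == none))
   match bestE, bestCrash with
   | some _, none => true
   | some e, some p => pvEntryLt e p
   | none, _ => false)

def Pre_traverse_part_one (maze : List String) (start_pos : Int × Int) : Prop :=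
  pvPreB maze start_pos = true

instance (maze : List String) (start_pos : Int × Int) : Decidable (Pre_traverse_part_one maze start_pos) := by
  unfold Pre_traverse_part_one; infer_instance

def pvWitness_traverse_part_one : List String × (Int × Int) := (["#E"], (0, 0))

def Spec_traverse_part_one (maze : List String) (start_pos : Int × Int) (out : Int) : Prop := out = traverse_part_one_alt maze start_pos
instance (maze : List String) (start_pos : Int × Int) (out : Int) : Decidable (Spec_traverse_part_one maze start_pos out) := by unfold Spec_traverse_part_one; infer_instance

-- ===== CLAIM (what is proved, stated in full; the proofs are below) =====
def Claim_equal_traverse_part_one : Prop := ∀ (maze : List String) (start_pos : Int × Int), Dom_traverse_part_one maze start_pos → Pre_traverse_part_one maze start_pos → Spec_traverse_part_one maze start_pos (traverse_part_one maze start_pos)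

-- ===== LEMMAS AND PROOFS =====

-- the (cost, state) contents of the bucket dict, as A-side queue entries
def pvFlat (b : PySem.Dict Int (List (Int × Int × Int × Int))) : List (Int × Int × Int × Int × Int) :=
  b.items.flatMap (fun p => p.2.map (fun s => (p.1, s)))

theorem pvEntryLe_refl (a : Int × Int × Int × Int × Int) : pvEntryLe a a = true := by
  simp [pvEntryLe]

theorem pvEntryLe_trans {a b c : Int × Int × Int × Int × Int}
    (h1 : pvEntryLe a b = true) (h2 : pvEntryLe b c = true) : pvEntryLe a c = true := by
  obtain ⟨a1, a2, a3, a4, a5⟩ := a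
  obtain ⟨b1, b2, b3, b4, b5⟩ := b
  obtain ⟨c1, c2, c3, c4, c5⟩ := c
  simp [pvEntryLe] at *
  omega

theorem pvEntryLe_antisymm {a b : Int × Int × Int × Int × Int}
    (h1 : pvEntryLe a b = true) (h2 : pvEntryLe b a = true) : a = b := by
  obtain ⟨a1, a2, a3, a4, a5⟩ := a
  obtain ⟨b1, b2, b3, b4, b5⟩ := b
  simp [pvEntryLe, Prod.ext_iff] at *
  omega

theorem pvEntryLe_total (a b : Int × Int × Int × Int × Int) :
    pvEntryLe a b = true ∨ pvEntryLe b a = true := by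
  obtain ⟨a1, a2, a3, a4, a5⟩ := a
  obtain ⟨b1, b2, b3, b4, b5⟩ := b
  simp [pvEntryLe]
  omega

-- bridge between A's 5-tuple comparator and B's sort key
theorem pvEntryLe_iff (c₁ c₂ : Int) (s₁ s₂ : Int × Int × Int × Int) :
    pvEntryLe (c₁, s₁) (c₂, s₂) = true ↔ (c₁ < c₂ ∨ (c₁ = c₂ ∧ pvKey4 s₁ ≤ pvKey4 s₂)) := by
  obtain ⟨a1, a2, a3, a4⟩ := s₁
  obtain ⟨b1, b2, b3, b4⟩ := s₂
  simp [pvEntryLe, pvKey4, Prod.Lex.toLex_le_toLex]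

theorem pvHeapPush_perm (e : Int × Int × Int × Int × Int) (l : List (Int × Int × Int × Int × Int)) :
    (pvHeapPush e l).Perm (e :: l) := by
  induction l with
  | nil => simp [pvHeapPush]
  | cons x xs ih =>
    simp only [pvHeapPush]
    by_cases h : pvEntryLe e x = true
    · rw [if_pos h]
    · rw [if_neg h]
      exact (ih.cons x).trans (List.Perm.swap e x xs)

theorem pvHeapPush_pairwise (e : Int × Int × Int × Int × Int)
    (l : List (Int × Int × Int × Int × Int))
    (hl : l.Pairwise (fun a b => pvEntryLe a b = true)) :
    (pvHeapPush e l).Pairwise (fun a b => pvEntryLe a b = true) := by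
  induction l with
  | nil => simp [pvHeapPush]
  | cons x xs ih =>
    rcases List.pairwise_cons.mp hl with ⟨hx, hxs⟩
    simp only [pvHeapPush]
    by_cases h : pvEntryLe e x = true
    · rw [if_pos h]
      refine List.pairwise_cons.mpr ⟨?_, hl⟩
      intro y hy
      rcases List.mem_cons.mp hy with h1 | h1
      · rw [h1]; exact h
      · exact pvEntryLe_trans h (hx y h1)
    · rw [if_neg h]
      refine List.pairwise_cons.mpr ⟨?_, ih hxs⟩
      intro y hy
      rcases List.mem_cons.mp ((pvHeapPush_perm e xs).mem_iff.mp hy) with h1 | h1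
      · rw [h1]
        rcases pvEntryLe_total x e with h' | h'
        · exact h'
        · exact absurd h' h
      · exact hx y h1

-- A's push guard and B's push guard are the same test
theorem pvGuard_eq (maze : List String) (v : PySem.Set (Int × Int × Int × Int))
    (k : Int) (σ : Int × Int × Int × Int) :
    pvOpen maze v (k, σ) =
      ((!(pvCell maze σ.1 σ.2.1 == some '#')) && !(PySem.Set.contains v σ)) := by
  have h : (pvCell maze σ.1 σ.2.1 == some '#') = decide (pvCell maze σ.1 σ.2.1 = some '#') := by
    by_cases h : pvCell maze σ.1 σ.2.1 = some '#' <;> simp [h]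
  simp [pvOpen, h]

-- buckets other than k are untouched by the overwrite map
theorem pvMap_congr_cond {k : Int} {l : List (Int × Int × Int × Int)}
    {s : Int × Int × Int × Int} {rest : List (Int × List (Int × Int × Int × Int))}
    (hknotin : k ∉ rest.map (fun p => p.1)) :
    rest.map (fun p => if (p.1 == k) = true then (k, l ++ [s]) else p) = rest := by
  induction rest with
  | nil => rfl
  | cons hd tl ih =>
    simp only [List.map_cons, List.mem_cons, not_or] at hknotin ⊢
    have h1 : (hd.1 == k) = false := by
      simp only [beq_eq_false_iff_ne]
      intro h
      exact hknotin.1 h.symm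
    rw [if_neg (by rw [h1]; exact Bool.false_ne_true), ih hknotin.2]

-- appending a state to a bucket adds exactly one (cost, state) entry to the flattened contents
theorem pvFlat_bucketAdd_aux (k : Int) (l : List (Int × Int × Int × Int))
    (s : Int × Int × Int × Int) :
    ∀ its : List (Int × List (Int × Int × Int × Int)), (k, l) ∈ its → (its.map (fun p => p.1)).Nodup →
      List.Perm
        ((its.map (fun p => if (p.1 == k) = true then (k, l ++ [s]) else p)).flatMap
          (fun p => p.2.map (fun t => (p.1, t))))
        ((k, s) :: its.flatMap (fun p => p.2.map (fun t => (p.1, t)))) := by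
  intro its
  induction its with
  | nil => intro h; simp at h
  | cons hd rest ih =>
    intro hmem hnd
    rcases List.mem_cons.mp hmem with heq | hmem'
    · have heq' : hd = (k, l) := heq.symm
      subst heq'
      have hknotin : k ∉ rest.map (fun p => p.1) := by
        have h0 := hnd
        simp only [List.map_cons] at h0
        exact (List.nodup_cons.mp h0).1
      have hrest : rest.map (fun p => if (p.1 == k) = true then (k, l ++ [s]) else p) = rest :=
        pvMap_congr_cond hknotin
      simp only [List.map_cons, beq_self_eq_true, if_true, hrest, List.flatMap_cons,
        List.map_append, List.map_cons, List.map_nil]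
      have hre : ((l.map (fun t => ((k, t) : Int × Int × Int × Int × Int)) ++ [(k, s)]) ++
              rest.flatMap (fun p => p.2.map (fun t => (p.1, t)))) =
          l.map (fun t => (k, t)) ++
              ((k, s) :: rest.flatMap (fun p => p.2.map (fun t => (p.1, t)))) := by simp
      rw [hre]
      exact List.perm_middle
    · have hnd' : (rest.map (fun p => p.1)).Nodup := (List.nodup_cons.mp hnd).2
      have hk : k ∈ rest.map (fun p => p.1) := List.mem_map.mpr ⟨(k, l), hmem', rfl⟩
      have hknotin : hd.1 ∉ rest.map (fun p => p.1) := by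
        have h0 := hnd
        simp only [List.map_cons] at h0
        exact (List.nodup_cons.mp h0).1
      have hhd : (hd.1 == k) = false := by
        simp only [beq_eq_false_iff_ne]
        intro h
        rw [h] at hknotin
        exact hknotin hk
      have hif : (if (hd.1 == k) = true then ((k, l ++ [s]) : Int × List (Int × Int × Int × Int)) else hd) = hd := by
        rw [if_neg (by rw [hhd]; exact Bool.false_ne_true)]
      simp only [List.map_cons, hif, List.flatMap_cons]
      refine List.Perm.trans (List.Perm.append_left _ (ih hmem' hnd')) ?_
      exact List.perm_middle

theorem pvFlat_bucketAdd (b : PySem.Dict Int (List (Int × Int × Int × Int))) (k : Int)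
    (s : Int × Int × Int × Int) (hnd : b.keys.Nodup) :
    (pvFlat (pvBucketAdd b k s)).Perm ((k, s) :: pvFlat b) := by
  unfold pvBucketAdd pvFlat
  by_cases hc : b.contains k = true
  · have hsome : ∃ l, b.get? k = some l := by
      have := PySem.Dict.contains_eq_isSome_get? b k
      rw [hc] at this
      exact Option.isSome_iff_exists.mp this.symm
    obtain ⟨l, hl⟩ := hsome
    have hmem : (k, l) ∈ b.items := PySem.Dict.mem_items_of_get?_eq_some b hl
    have hgd : b.getD k [] = l := PySem.Dict.getD_of_mem_items b hmem hnd []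
    rw [hgd, PySem.Dict.items_insert_of_contains b _ hc]
    exact pvFlat_bucketAdd_aux k l s b.items hmem hnd
  · rw [PySem.Dict.getD_of_not_contains b [] (by simpa using hc),
        PySem.Dict.items_insert_of_not_contains b _ (by simpa using hc)]
    simp only [List.flatMap_append, List.flatMap_cons, List.flatMap_nil, List.nil_append,
      List.append_nil, List.map_cons, List.map_nil]
    exact List.perm_append_singleton _ _

-- removing a bucket removes exactly its (cost, state) entries from the flattened contents
theorem pvFlat_erase_aux (k : Int) (l : List (Int × Int × Int × Int)) :
    ∀ its : List (Int × List (Int × Int × Int × Int)), (k, l) ∈ its → (its.map (fun p => p.1)).Nodup →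
      List.Perm (its.flatMap (fun p => p.2.map (fun t => (p.1, t))))
        (l.map (fun t => (k, t)) ++
          (its.filter (fun p => !(p.1 == k))).flatMap (fun p => p.2.map (fun t => (p.1, t)))) := by
  intro its
  induction its with
  | nil => intro h; simp at h
  | cons hd rest ih =>
    intro hmem hnd
    rcases List.mem_cons.mp hmem with heq | hmem'
    · have heq' : hd = (k, l) := heq.symm
      subst heq'
      have hknotin : k ∉ rest.map (fun p => p.1) := by
        have h0 := hnd
        simp only [List.map_cons] at h0
        exact (List.nodup_cons.mp h0).1
      have hfilt : rest.filter (fun p => !(p.1 == k)) = rest := by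
        apply List.filter_eq_self.mpr
        intro p hp
        have hpk : (p.1 == k) = false := by
          simp only [beq_eq_false_iff_ne]
          intro hpk
          exact hknotin (List.mem_map.mpr ⟨p, hp, hpk⟩)
        rw [hpk]
        rfl
      simp [hfilt]
    · have hnd' : (rest.map (fun p => p.1)).Nodup := (List.nodup_cons.mp hnd).2
      have hk : k ∈ rest.map (fun p => p.1) := List.mem_map.mpr ⟨(k, l), hmem', rfl⟩
      have hknotin : hd.1 ∉ rest.map (fun p => p.1) := by
        have h0 := hnd
        simp only [List.map_cons] at h0
        exact (List.nodup_cons.mp h0).1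
      have hhd : (hd.1 == k) = false := by
        simp only [beq_eq_false_iff_ne]
        intro h
        rw [h] at hknotin
        exact hknotin hk
      have hiff : (!(hd.1 == k)) = true := by rw [hhd]; rfl
      simp only [List.filter_cons, hiff, List.flatMap_cons]
      refine List.Perm.trans (List.Perm.append_left _ (ih hmem' hnd')) ?_
      exact List.perm_append_comm_assoc _ _ _

theorem pvFlat_erase (b : PySem.Dict Int (List (Int × Int × Int × Int))) (k : Int)
    (l : List (Int × Int × Int × Int)) (hmem : (k, l) ∈ b.items) (hnd : b.keys.Nodup) :
    (pvFlat b).Perm (l.map (fun t => (k, t)) ++ pvFlat (b.erase k)) := by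
  unfold pvFlat
  have h : (b.erase k).items = b.items.filter (fun p => !(p.1 == k)) := rfl
  rw [h]
  exact pvFlat_erase_aux k l b.items hmem hnd

theorem mem_pvFlat {b : PySem.Dict Int (List (Int × Int × Int × Int))}
    {x : Int × Int × Int × Int × Int} (hx : x ∈ pvFlat b) :
    ∃ p ∈ b.items, x.1 = p.1 ∧ x.2 ∈ p.2 := by
  unfold pvFlat at hx
  obtain ⟨p, hp, hx'⟩ := List.mem_flatMap.mp hx
  obtain ⟨t, ht, rfl⟩ := List.mem_map.mp hx'
  exact ⟨p, hp, rfl, ht⟩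

-- one push-fold step on both sides preserves the simulation invariant
theorem pvPush_fold (maze : List String) (v' : PySem.Set (Int × Int × Int × Int)) (c : Int)
    (R : List (Int × Int × Int × Int × Int)) :
    ∀ (ds : List (Int × (Int × Int × Int × Int))) (q : List (Int × Int × Int × Int × Int))
      (b : PySem.Dict Int (List (Int × Int × Int × Int))),
      (∀ d ∈ ds, 0 < d.1) →
      q.Pairwise (fun a b => pvEntryLe a b = true) →
      q.Perm (R ++ pvFlat b) →
      (∀ p ∈ b.items, p.2 ≠ []) →
      (∀ p ∈ b.items, c < p.1) →
      b.keys.Nodup →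
      (ds.foldl (fun q d => if pvOpen maze v' (c + d.1, d.2) then pvHeapPush (c + d.1, d.2) q else q) q).Pairwise
          (fun a b => pvEntryLe a b = true) ∧
      (ds.foldl (fun q d => if pvOpen maze v' (c + d.1, d.2) then pvHeapPush (c + d.1, d.2) q else q) q).Perm
        (R ++ pvFlat (ds.foldl (fun b d => if pvOpen maze v' (c + d.1, d.2) then pvBucketAdd b (c + d.1) d.2 else b) b)) ∧
      (∀ p ∈ (ds.foldl (fun b d => if pvOpen maze v' (c + d.1, d.2) then pvBucketAdd b (c + d.1) d.2 else b) b).items, p.2 ≠ []) ∧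
      (∀ p ∈ (ds.foldl (fun b d => if pvOpen maze v' (c + d.1, d.2) then pvBucketAdd b (c + d.1) d.2 else b) b).items, c < p.1) ∧
      (ds.foldl (fun b d => if pvOpen maze v' (c + d.1, d.2) then pvBucketAdd b (c + d.1) d.2 else b) b).keys.Nodup := by
  intro ds
  induction ds with
  | nil => intro q b _ h1 h2 h3 h4 h5; exact ⟨h1, h2, h3, h4, h5⟩
  | cons d ds ih =>
    intro q b hw h1 h2 h3 h4 h5
    simp only [List.foldl_cons]
    by_cases hg : pvOpen maze v' (c + d.1, d.2) = true
    · rw [if_pos hg, if_pos hg]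
      refine ih _ _ (fun x hx => hw x (List.mem_cons_of_mem _ hx))
        (pvHeapPush_pairwise _ _ h1) ?_ ?_ ?_ (PySem.Dict.nodup_keys_insert _ _ _ h5)
      · refine ((pvHeapPush_perm _ q).trans (h2.cons _)).trans ?_
        refine List.Perm.trans ?_ (List.Perm.append_left R (pvFlat_bucketAdd b (c + d.1) d.2 h5).symm)
        exact List.perm_middle.symm
      · intro p hp
        rcases (PySem.Dict.mem_items_insert _ _ _ p).mp hp with rfl | ⟨hp', _⟩
        · simp
        · exact h3 p hp'
      · intro p hp
        rcases (PySem.Dict.mem_items_insert _ _ _ p).mp hp with rfl | ⟨hp', _⟩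
        · have := hw d List.mem_cons_self; simp; omega
        · exact h4 p hp'
    · rw [if_neg hg, if_neg hg]
      exact ih _ _ (fun x hx => hw x (List.mem_cons_of_mem _ hx)) h1 h2 h3 h4 h5

-- processing one state: A's pop+expand step equals B's pvStepB continuation
theorem pvStep_eq (maze : List String) (fuel : Nat)
    (IH : ∀ (layer : List (Int × Int × Int × Int)) (c : Int)
      (b : PySem.Dict Int (List (Int × Int × Int × Int)))
      (v : PySem.Set (Int × Int × Int × Int)) (q : List (Int × Int × Int × Int × Int)),
      q.Pairwise (fun a b => pvEntryLe a b = true) →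
      q.Perm (layer.map (fun s => (c, s)) ++ pvFlat b) →
      layer.Pairwise (fun a b => pvKey4 a ≤ pvKey4 b) →
      (∀ p ∈ b.items, p.2 ≠ []) →
      (∀ p ∈ b.items, layer ≠ [] → c < p.1) →
      b.keys.Nodup →
      pvRunA maze fuel q v = pvGo maze fuel layer c b v)
    (c : Int) (s : Int × Int × Int × Int) (rest : List (Int × Int × Int × Int))
    (b : PySem.Dict Int (List (Int × Int × Int × Int)))
    (v : PySem.Set (Int × Int × Int × Int)) (q : List (Int × Int × Int × Int × Int))
    (hq : q.Pairwise (fun a b => pvEntryLe a b = true))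
    (hperm : q.Perm ((c, s) :: (rest.map (fun t => (c, t)) ++ pvFlat b)))
    (hhead : ∀ t ∈ rest, pvKey4 s ≤ pvKey4 t)
    (hrest : rest.Pairwise (fun a b => pvKey4 a ≤ pvKey4 b))
    (hne : ∀ p ∈ b.items, p.2 ≠ [])
    (hlt : ∀ p ∈ b.items, c < p.1)
    (hnd : b.keys.Nodup) :
    pvRunA maze (fuel + 1) q v =
      (match pvStepB maze c s b v with
       | none => c
       | some (b', v') => pvGo maze fuel rest c b' v') := by
  -- (c, s) is a minimum of q, and q is sorted, so q's head IS (c, s)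
  have hmin : ∀ x ∈ q, pvEntryLe (c, s) x = true := by
    intro x hx
    rcases List.mem_cons.mp (hperm.mem_iff.mp hx) with rfl | hx'
    · exact pvEntryLe_refl _
    · rcases List.mem_append.mp hx' with hx'' | hx''
      · obtain ⟨t, ht, rfl⟩ := List.mem_map.mp hx''
        exact (pvEntryLe_iff c c s t).mpr (Or.inr ⟨rfl, hhead t ht⟩)
      · obtain ⟨p, hp, h1, _⟩ := mem_pvFlat hx''
        obtain ⟨x1, x2⟩ := x
        refine (pvEntryLe_iff c x1 s x2).mpr (Or.inl ?_)
        rw [show x1 = p.1 from h1]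
        exact hlt p hp
  obtain ⟨e, q', rfl⟩ : ∃ e q', q = e :: q' := by
    cases q with
    | nil => exact absurd hperm.length_eq (by simp)
    | cons e q' => exact ⟨e, q', rfl⟩
  have hhd : e = (c, s) := by
    have h1 : pvEntryLe (c, s) e = true := hmin e List.mem_cons_self
    have h2 : pvEntryLe e (c, s) = true := by
      rcases List.mem_cons.mp (hperm.symm.mem_iff.mp List.mem_cons_self) with heq | hmem
      · rw [heq]; exact pvEntryLe_refl _
      · exact (List.pairwise_cons.mp hq).1 _ hmem
    exact pvEntryLe_antisymm h2 h1
  subst hhd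
  have hq' : q'.Perm (rest.map (fun t => (c, t)) ++ pvFlat b) := by
    have := hperm.erase (c, s)
    rwa [List.erase_cons_head, List.erase_cons_head] at this
  obtain ⟨r, cc, dr, dc⟩ := s
  simp only [pvRunA, pvStepB]
  by_cases hE : pvCell maze r cc = some 'E'
  · rw [if_pos hE, if_pos hE]
  · rw [if_neg hE, if_neg hE]
    have hlist : [(c + 1, r + dr, cc + dc, dr, dc),
                  (c + 1000, r, cc, dc, -dr),
                  (c + 1000, r, cc, -dc, dr)] =
        ([((1 : Int), (r + dr, cc + dc, dr, dc)),
          ((1000 : Int), (r, cc, dc, -dr)),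
          ((1000 : Int), (r, cc, -dc, dr))].map
          (fun d => ((c + d.1, d.2) : Int × Int × Int × Int × Int))) := rfl
    rw [hlist, List.foldl_map]
    have hguard : ∀ (bk : PySem.Dict Int (List (Int × Int × Int × Int)))
        (d : Int × (Int × Int × Int × Int)),
        (if (!(pvCell maze d.2.1 d.2.2.1 == some '#')) &&
            !(PySem.Set.contains (PySem.Set.add v (r, cc, dr, dc)) d.2)
         then pvBucketAdd bk (c + d.1) d.2 else bk) =
        (if pvOpen maze (PySem.Set.add v (r, cc, dr, dc)) (c + d.1, d.2)
         then pvBucketAdd bk (c + d.1) d.2 else bk) := by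
      intro bk d
      rw [pvGuard_eq]
    simp only [hguard]
    have hpf := pvPush_fold maze (PySem.Set.add v (r, cc, dr, dc)) c
      (rest.map (fun t => (c, t)))
      [((1 : Int), (r + dr, cc + dc, dr, dc)),
       ((1000 : Int), (r, cc, dc, -dr)),
       ((1000 : Int), (r, cc, -dc, dr))] q' b
      (by intro d hd; rcases List.mem_cons.mp hd with rfl | hd' <;>
            [norm_num; skip]
          rcases List.mem_cons.mp hd' with rfl | hd'' <;>
            [norm_num; skip]
          rcases List.mem_cons.mp hd'' with rfl | h0 <;> [norm_num; simp at h0])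
      (List.Pairwise.sublist (List.sublist_cons_self _ _) hq) hq' hne hlt hnd
    exact IH rest c _ _ _ hpf.1 hpf.2.1 hrest hpf.2.2.1
      (fun p hp _ => hpf.2.2.2.1 p hp) hpf.2.2.2.2

-- the simulation: A's heap loop equals B's bucket-layer loop
theorem pvRun_eq_go (maze : List String) :
    ∀ (fuel : Nat) (layer : List (Int × Int × Int × Int)) (c : Int)
      (b : PySem.Dict Int (List (Int × Int × Int × Int)))
      (v : PySem.Set (Int × Int × Int × Int)) (q : List (Int × Int × Int × Int × Int)),
      q.Pairwise (fun a b => pvEntryLe a b = true) →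
      q.Perm (layer.map (fun s => (c, s)) ++ pvFlat b) →
      layer.Pairwise (fun a b => pvKey4 a ≤ pvKey4 b) →
      (∀ p ∈ b.items, p.2 ≠ []) →
      (∀ p ∈ b.items, layer ≠ [] → c < p.1) →
      b.keys.Nodup →
      pvRunA maze fuel q v = pvGo maze fuel layer c b v := by
  intro fuel
  induction fuel with
  | zero =>
    intro layer c b v q _ _ _ _ _ _
    cases q <;> simp [pvRunA, pvGo]
  | succ fuel ih =>
    intro layer c b v q hq hperm hlay hne hlt hnd
    cases layer with
    | cons s rest =>
      have hperm' : q.Perm ((c, s) :: (rest.map (fun t => (c, t)) ++ pvFlat b)) := by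
        simpa using hperm
      rw [show pvGo maze (fuel + 1) (s :: rest) c b v =
          (match pvStepB maze c s b v with
           | none => c
           | some (b', v') => pvGo maze fuel rest c b' v') from rfl]
      exact pvStep_eq maze fuel ih c s rest b v q hq hperm'
        ((List.pairwise_cons.mp hlay).1) ((List.pairwise_cons.mp hlay).2) hne
        (fun p hp => hlt p hp (by simp)) hnd
    | nil =>
      by_cases hemp : b.items.isEmpty
      · have hflat : pvFlat b = [] := by
          unfold pvFlat
          rw [List.isEmpty_iff.mp hemp]
          rfl
        have hq0 : q = [] := by
          have h2 : q.Perm [] := by simpa [hflat] using hperm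
          exact h2.eq_nil
        subst hq0
        simp [pvRunA, pvGo, hemp]
      · have hitems : b.items ≠ [] := by
          intro h; rw [h] at hemp; simp at hemp
        have hkeys : b.keys ≠ [] := by
          intro h
          exact hitems (List.map_eq_nil_iff.mp h)
        obtain ⟨c', hc'⟩ : ∃ c', PySem.List.min? b.keys (fun k => k) = some c' := by
          cases h : PySem.List.min? b.keys (fun k => k) with
          | none => exact absurd ((PySem.List.min?_eq_none_iff _ _).mp h) hkeys
          | some c' => exact ⟨c', rfl⟩
        have hc'mem : c' ∈ b.keys := PySem.List.min?_mem hc'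
        obtain ⟨p0, hp0, hp0k⟩ := List.mem_map.mp hc'mem
        obtain ⟨k0, l0⟩ := p0
        have hp0k' : k0 = c' := hp0k
        subst hp0k'
        clear hp0k
        have hgd : b.getD k0 [] = l0 := PySem.Dict.getD_of_mem_items b hp0 hnd []
        have hl0 : l0 ≠ [] := hne _ hp0
        obtain ⟨s, rest, hsr⟩ : ∃ s rest, PySem.List.sorted l0 pvKey4 = s :: rest := by
          cases h : PySem.List.sorted l0 pvKey4 with
          | nil => exact absurd ((PySem.List.sorted_eq_nil_iff _ _ _).mp h) hl0
          | cons s rest => exact ⟨s, rest, rfl⟩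
        have h1 : (match some k0 with
            | none => (0 : Int)
            | some c =>
              match PySem.List.sorted (b.getD c []) pvKey4 with
              | [] => 0
              | s :: rest =>
                match pvStepB maze c s (b.erase c) v with
                | none => c
                | some (b', v') => pvGo maze fuel rest c b' v') =
            (match pvStepB maze k0 s (b.erase k0) v with
             | none => k0
             | some (b', v') => pvGo maze fuel rest k0 b' v') := by
          show (match PySem.List.sorted (b.getD k0 []) pvKey4 with
                | [] => (0 : Int)
                | s :: rest =>
                  match pvStepB maze k0 s (b.erase k0) v with
                  | none => k0
                  | some (b', v') => pvGo maze fuel rest k0 b' v') = _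
          rw [hgd, hsr]
        rw [show pvGo maze (fuel + 1) [] c b v =
            (if b.items.isEmpty then 0
             else match PySem.List.min? b.keys (fun k => k) with
             | none => 0
             | some c =>
               match PySem.List.sorted (b.getD c []) pvKey4 with
               | [] => 0
               | s :: rest =>
                 match pvStepB maze c s (b.erase c) v with
                 | none => c
                 | some (b', v') => pvGo maze fuel rest c b' v') from rfl]
        rw [if_neg hemp, hc', h1]
        -- invariant for the new layer over the dict without its minimal bucket
        have hsub : ∀ p ∈ (b.erase k0).items, p ∈ b.items := by
          intro p hp
          exact List.mem_of_mem_filter hp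
        have hlt' : ∀ p ∈ (b.erase k0).items, k0 < p.1 := by
          intro p hp
          have h1 : k0 ≤ p.1 :=
            PySem.List.min?_isMin hc' p.1 (List.mem_map.mpr ⟨p, hsub p hp, rfl⟩)
          have hp' : p ∈ b.items.filter (fun p => !(p.1 == k0)) := hp
          have h2 : (!(p.1 == k0)) = true := (List.mem_filter.mp hp').2
          have h3 : p.1 ≠ k0 := by simpa using h2
          omega
        have hnd' : (b.erase k0).keys.Nodup := by
          have hsl : (b.erase k0).items.Sublist b.items := List.filter_sublist
          unfold PySem.Dict.keys at hnd ⊢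
          exact List.Sublist.nodup (List.Sublist.map _ hsl) hnd
        have hperm' : q.Perm ((k0, s) :: (rest.map (fun t => (k0, t)) ++ pvFlat (b.erase k0))) := by
          refine (by simpa using hperm : q.Perm (pvFlat b)).trans ?_
          refine (pvFlat_erase b k0 l0 hp0 hnd).trans ?_
          have hmap : (l0.map (fun t => ((k0, t) : Int × Int × Int × Int × Int))).Perm
              ((s :: rest).map (fun t => (k0, t))) :=
            ((hsr ▸ PySem.List.sorted_perm l0 pvKey4 false).symm).map _
          refine (List.Perm.append_right _ hmap).trans ?_
          simp
        have hsorted := PySem.List.sorted_pairwise l0 pvKey4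
        rw [hsr] at hsorted
        exact pvStep_eq maze fuel ih k0 s rest (b.erase k0) v q hq hperm'
          ((List.pairwise_cons.mp hsorted).1) ((List.pairwise_cons.mp hsorted).2)
          (fun p hp => hne p (hsub p hp)) hlt' hnd'

theorem pvTop_eq (maze : List String) (start_pos : Int × Int) :
    traverse_part_one maze start_pos = traverse_part_one_alt maze start_pos := by
  obtain ⟨sr, sc⟩ := start_pos
  simp only [traverse_part_one, traverse_part_one_alt]
  have hitems : (PySem.Dict.ofList [((0 : Int), [(sr, sc, (0 : Int), (1 : Int))])]).items =
      [((0 : Int), [(sr, sc, (0 : Int), (1 : Int))])] := rfl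
  refine pvRun_eq_go maze (pvFuel maze) [] 0 _ _ _ ?_ ?_ ?_ ?_ ?_ ?_
  · simp
  · unfold pvFlat
    rw [hitems]
    simp
  · simp
  · intro p hp
    rw [hitems] at hp
    simp only [List.mem_singleton] at hp
    subst hp
    simp
  · intro p _ h
    simp at h
  · unfold PySem.Dict.keys
    rw [hitems]
    simp

-- ===== VERDICT (by name: the statement is the Claim_ definition above) =====
theorem traverse_part_one_spec : Claim_equal_traverse_part_one := by
  intro maze start_pos _ _
  unfold Spec_traverse_part_one
  exact pvTop_eq maze start_pos
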